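-- pv_equiv track=rewrite | github.com/AthharPro/zypher | python-scanner/zypher_scanner/db_ruls/cicd-vuln-008.py | _find_azure_task_line
-- ===== SOURCE A (Python) =====
-- from typing import List, Dict, Any, Optional
--
-- def _find_azure_task_line(file_lines: List[str], job_index: int, step_index: int) -> int:
--     job_count = -1
--     job_line = -1
--     step_count = -1
--     for i, line in enumerate(file_lines):
--         if "- job:" in line:
--             job_count += 1
--             if job_count == job_index:
--                 job_line = i
--                 break
--     if job_line < 0:
--         return -1
--     steps_line = -1
--     for i in range(job_line, len(file_lines)):
--         if "steps:" in file_lines[i]: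
--             steps_line = i
--             break
--     if steps_line < 0:
--         return -1
--     for i in range(steps_line + 1, len(file_lines)):
--         if "- task:" in file_lines[i] or "- script:" in file_lines[i] or "- bash:" in file_lines[i] or "- powershell:" in file_lines[i]:
--             step_count += 1
--             if step_count == step_index:
--                 return i
--         if line.strip() and not line.strip().startswith("-") and not line.strip().startswith(" "):
--             break
--     return -1
-- ===== SOURCE B (Python) =====
-- from typing import List
--
--
-- def _find_azure_task_line(file_lines: List[str], job_index: int, step_index: int) -> int:
--     phase = 0  # 0: locate the job, 1: locate its "steps:" key, 2: count step entries
--     jobs_seen = 0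
--     steps_seen = 0
--     for i, line in enumerate(file_lines):
--         if phase == 0:
--             if "- job:" not in line:
--                 continue
--             if jobs_seen != job_index:
--                 jobs_seen += 1
--                 continue
--             phase = 1  # fall through: the job line itself may contain "steps:"
--         if phase == 1:
--             if "steps:" in line:
--                 phase = 2
--             continue
--         if ("- task:" in line or "- script:" in line
--                 or "- bash:" in line or "- powershell:" in line):
--             if steps_seen == step_index:
--                 return i
--             steps_seen += 1
--     return -1
-- ===== Notes on version B (the rewrite author's own statement) =====
-- stated objective: alternative
-- what changed: B replaces A's three separate index scans by a single pass over file_lines driven by a phase variable (find job / find steps / count steps) with compare-then-increment counters, and drops A's loop-exit test that re-reads the stale `line` variable left over from the first loop.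
-- intended difference: On inputs where the stripped text of the selected '- job:' line does not start with '-' (so A's stale-variable break fires) and the requested step marker lies beyond the first line after 'steps:', A returns -1 while B returns the actual index of the step_index-th step marker line, which is the intended result because the break was meant to test the current line, not the remembered job line. — e.g. on _find_azure_task_line(["x - job: a", "steps:", "irrelevant", "- task: t"], 0, 0): A returns -1, B returns 3
import Mathlib
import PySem

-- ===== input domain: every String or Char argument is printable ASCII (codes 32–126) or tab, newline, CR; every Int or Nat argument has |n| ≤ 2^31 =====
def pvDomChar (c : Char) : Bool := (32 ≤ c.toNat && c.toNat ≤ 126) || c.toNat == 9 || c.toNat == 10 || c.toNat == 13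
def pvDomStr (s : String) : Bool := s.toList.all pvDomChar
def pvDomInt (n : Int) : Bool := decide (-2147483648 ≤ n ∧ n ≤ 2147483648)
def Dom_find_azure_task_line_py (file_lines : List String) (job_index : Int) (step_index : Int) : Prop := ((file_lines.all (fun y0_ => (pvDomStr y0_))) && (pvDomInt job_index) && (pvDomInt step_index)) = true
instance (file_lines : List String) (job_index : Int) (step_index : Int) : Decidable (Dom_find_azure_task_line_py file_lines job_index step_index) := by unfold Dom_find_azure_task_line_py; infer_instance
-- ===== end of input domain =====

-- B replaces A's three separate scans by a single phase-driven pass and drops A's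
-- loop-exit test on the stale `line` variable; on the inputs where that stale break
-- changes A's answer (D_ below) B returns the intended step line instead of A's -1.

-- shared line predicates ("…" in line tests of the Python)
def pvHasJob (l : String) : Bool := PySem.Str.isIn "- job:" l
def pvHasSteps (l : String) : Bool := PySem.Str.isIn "steps:" l
def pvIsStep (l : String) : Bool :=
  PySem.Str.isIn "- task:" l || PySem.Str.isIn "- script:" l ||
  PySem.Str.isIn "- bash:" l || PySem.Str.isIn "- powershell:" l
-- A's third-loop break test, evaluated on the stale `line` (the matched job line)
def pvBreakCond (l : String) : Bool :=
  decide (PySem.Str.len (PySem.Str.strip l) ≠ 0) &&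
  !(PySem.Str.startswith (PySem.Str.strip l) "-") &&
  !(PySem.Str.startswith (PySem.Str.strip l) " ")

-- ===== PORT A =====
-- first loop: count "- job:" lines until job_count == job_index; keeps the matched
-- line and the remaining suffix (enumerate index carried in i)
def pvFindJob (job_index : Int) : Int → Nat → List String → Option (Nat × String × List String)
  | _, _, [] => none
  | jc, i, l :: rest =>
    if pvHasJob l then
      if jc + 1 = job_index then some (i, l, rest)
      else pvFindJob job_index (jc + 1) (i + 1) rest
    else pvFindJob job_index jc (i + 1) rest

-- second loop: range(job_line, len) scanning for "steps:" (suffix scan)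
def pvFindSteps : Nat → List String → Option (Nat × List String)
  | _, [] => none
  | i, l :: rest => if pvHasSteps l then some (i, rest) else pvFindSteps (i + 1) rest

-- third loop: count step markers; A's break re-reads the stale job line `jline`
def pvCountLoop (jline : String) (step_index : Int) : Int → Nat → List String → Int
  | _, _, [] => -1
  | sc, i, l :: rest =>
    if pvIsStep l then
      if sc + 1 = step_index then (i : Int)
      else if pvBreakCond jline then -1 else pvCountLoop jline step_index (sc + 1) (i + 1) rest
    else if pvBreakCond jline then -1 else pvCountLoop jline step_index sc (i + 1) rest

def find_azure_task_line_py (file_lines : List String) (job_index : Int) (step_index : Int) : Int :=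
  match pvFindJob job_index (-1) 0 file_lines with
  | none => -1
  | some (jl, jline, restAfterJob) =>
    match pvFindSteps jl (jline :: restAfterJob) with
    | none => -1
    | some (sl, restAfterSteps) => pvCountLoop jline step_index (-1) (sl + 1) restAfterSteps

-- ===== PORT B =====
-- single pass with a phase variable: 0 = find job, 1 = find steps, 2 = count steps
def pvAltLoop (job_index step_index : Int) : List String → Nat → Nat → Int → Int → Int
  | [], _, _, _, _ => -1
  | l :: rest, i, phase, jobs, steps =>
    if phase = 0 then
      if !pvHasJob l then pvAltLoop job_index step_index rest (i + 1) 0 jobs steps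
      else if jobs ≠ job_index then pvAltLoop job_index step_index rest (i + 1) 0 (jobs + 1) steps
      else -- job found; fall through: the job line itself may contain "steps:"
        if pvHasSteps l then pvAltLoop job_index step_index rest (i + 1) 2 jobs steps
        else pvAltLoop job_index step_index rest (i + 1) 1 jobs steps
    else if phase = 1 then
      if pvHasSteps l then pvAltLoop job_index step_index rest (i + 1) 2 jobs steps
      else pvAltLoop job_index step_index rest (i + 1) 1 jobs steps
    else
      if pvIsStep l then
        if steps = step_index then (i : Int)
        else pvAltLoop job_index step_index rest (i + 1) 2 jobs (steps + 1)
      else pvAltLoop job_index step_index rest (i + 1) 2 jobs steps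

def find_azure_task_line_py_alt (file_lines : List String) (job_index : Int) (step_index : Int) : Int :=
  pvAltLoop job_index step_index file_lines 0 0 0 0

-- ===== PRECONDITION & SPEC =====
-- D_: A's selected job line strips to text not starting with '-', and the requested
-- step marker lies beyond the single line after "steps:" that A still examines
def pvDFlag (L : List String) (ji si : Int) : Bool :=
  (ji.toNat?.bind fun j => ((List.range L.length).filter fun i => pvHasJob (L.getD i ""))[j]?).any fun jl =>
    (List.findIdx? pvHasSteps (L.drop jl)).any fun s =>
      pvBreakCond (L.getD jl "") &&
      decide (0 ≤ si ∧ si < ((L.drop (jl + s + 1)).countP pvIsStep : Int)) &&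
      !(decide (si = 0) && pvIsStep ((L.drop (jl + s + 1)).headD ""))

-- On inputs where the stripped text of the selected "- job:" line does not start with '-'
-- (so A's break on the stale `line` variable fires) and the requested step marker lies beyond
-- the first line after "steps:", A returns -1 while B returns the index of the step_index-th
-- step marker line, the intended result (the break was meant to test the current line).
def D_find_azure_task_line_py (file_lines : List String) (job_index : Int) (step_index : Int) : Prop :=
  pvDFlag file_lines job_index step_index = true
instance (file_lines : List String) (job_index : Int) (step_index : Int) : Decidable (D_find_azure_task_line_py file_lines job_index step_index) := by unfold D_find_azure_task_line_py; infer_instance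

def Spec_find_azure_task_line_py (file_lines : List String) (job_index : Int) (step_index : Int) (out : Int) : Prop := ¬ D_find_azure_task_line_py file_lines job_index step_index → out = find_azure_task_line_py_alt file_lines job_index step_index
instance (file_lines : List String) (job_index : Int) (step_index : Int) (out : Int) : Decidable (Spec_find_azure_task_line_py file_lines job_index step_index out) := by unfold Spec_find_azure_task_line_py; infer_instance

def pvDiffWitness_find_azure_task_line_py : List String × Int × Int :=
  (["x - job: a", "steps:", "irrelevant", "- task: t"], 0, 0)
def pvDiffWitnessOut_find_azure_task_line_py : Int × Int := (-1, 3)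

-- ===== CLAIM (what is proved, stated in full; the proofs are below) =====
def Claim_unchanged_find_azure_task_line_py : Prop := ∀ (file_lines : List String) (job_index : Int) (step_index : Int), Dom_find_azure_task_line_py file_lines job_index step_index → Spec_find_azure_task_line_py file_lines job_index step_index (find_azure_task_line_py file_lines job_index step_index)
def Claim_changed_find_azure_task_line_py : Prop := Dom_find_azure_task_line_py (pvDiffWitness_find_azure_task_line_py.1) (pvDiffWitness_find_azure_task_line_py.2.1) (pvDiffWitness_find_azure_task_line_py.2.2) ∧ D_find_azure_task_line_py (pvDiffWitness_find_azure_task_line_py.1) (pvDiffWitness_find_azure_task_line_py.2.1) (pvDiffWitness_find_azure_task_line_py.2.2) ∧ find_azure_task_line_py (pvDiffWitness_find_azure_task_line_py.1) (pvDiffWitness_find_azure_task_line_py.2.1) (pvDiffWitness_find_azure_task_line_py.2.2) = pvDiffWitnessOut_find_azure_task_line_py.1 ∧ find_azure_task_line_py_alt (pvDiffWitness_find_azure_task_line_py.1) (pvDiffWitness_find_azure_task_line_py.2.1) (pvDiffWitness_find_azure_task_line_py.2.2) = pvDiffWitnessOut_find_azure_task_line_py.2 ∧ pvDiffWitnessOut_find_azure_task_line_py.1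 ≠ pvDiffWitnessOut_find_azure_task_line_py.2
def Claim_exact_find_azure_task_line_py : Prop := ∀ (file_lines : List String) (job_index : Int) (step_index : Int), Dom_find_azure_task_line_py file_lines job_index step_index → D_find_azure_task_line_py file_lines job_index step_index → find_azure_task_line_py file_lines job_index step_index ≠ find_azure_task_line_py_alt file_lines job_index step_index

-- ===== LEMMAS AND PROOFS =====

-- proof-side descriptive helpers (used only to restate pvDFlag for the induction proofs)
def pvJobLine? : List String → Int → Option Nat
  | [], _ => none
  | l :: rest, k =>
    if pvHasJob l then
      if k = 0 then some 0 else (pvJobLine? rest (k - 1)).map (· + 1)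
    else (pvJobLine? rest k).map (· + 1)

def pvCountSteps (tail : List String) : Nat := (tail.filter pvIsStep).length

def pvResid (step_index : Int) (after : List String) : Bool :=
  decide (0 ≤ step_index) && decide (step_index < (pvCountSteps after : Int)) &&
  !(decide (step_index = 0) && pvIsStep (after.headD ""))

def pvDOld (L : List String) (ji si : Int) : Bool :=
  match pvJobLine? L ji with
  | none => false
  | some jl =>
    pvBreakCond ((L.drop jl).headD "") &&
    match List.findIdx? pvHasSteps (L.drop jl) with
    | none => false
    | some s => pvResid si ((L.drop jl).drop (s + 1))

theorem jobLine_eq : ∀ (L : List String) (k : Int),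
    (if 0 ≤ k then ((List.range L.length).filter fun i => pvHasJob (L.getD i ""))[k.toNat]? else none)
      = pvJobLine? L k := by
  intro L
  induction L with
  | nil => intro k; simp [pvJobLine?]
  | cons l rest ih =>
    intro k
    simp only [pvJobLine?, List.length_cons, List.range_succ_eq_map, List.filter_cons,
      List.getD_cons_zero, List.filter_map]
    by_cases hj : pvHasJob l = true
    · rw [if_pos hj, if_pos hj]
      by_cases hk : k = 0
      · subst hk; simp
      · rw [if_neg hk]
        by_cases hk0 : 0 ≤ k
        · have hk1 : 0 ≤ k - 1 := by
            rcases lt_or_eq_of_le hk0 with h | h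
            · omega
            · omega
          rw [if_pos hk0, ← ih (k - 1), if_pos hk1]
          have : k.toNat = (k - 1).toNat + 1 := by omega
          rw [this]
          simp [Function.comp_def, Nat.succ_eq_add_one]
        · rw [if_neg hk0, ← ih (k - 1), if_neg (by omega : ¬ (0 ≤ k - 1))]
          simp
    · rw [if_neg hj, if_neg hj, ← ih k]
      by_cases hk0 : 0 ≤ k
      · rw [if_pos hk0, if_pos hk0]
        simp [Function.comp_def, Nat.succ_eq_add_one]
      · rw [if_neg hk0, if_neg hk0]
        simp

theorem int_toNat?_bind {α : Type} (n : Int) (f : Nat → Option α) :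
    n.toNat?.bind f = if 0 ≤ n then f n.toNat else none := by
  cases n <;> simp [Int.toNat?]

theorem dflag_eq (L : List String) (ji si : Int) : pvDFlag L ji si = pvDOld L ji si := by
  unfold pvDFlag pvDOld
  rw [int_toNat?_bind, jobLine_eq]
  cases hJ : pvJobLine? L ji with
  | none => simp
  | some jl =>
    simp only [Option.any_some]
    cases hS : List.findIdx? pvHasSteps (L.drop jl) with
    | none => simp
    | some s =>
      simp only [Option.any_some, pvResid, pvCountSteps, List.countP_eq_length_filter]
      have hdd : L.drop (jl + s + 1) = (L.drop jl).drop (s + 1) := by rw [List.drop_drop]; congr 1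
      have hh : L.getD jl "" = (L.drop jl).headD "" := by
        simp [List.getD_eq_getElem?_getD, List.headD_eq_head?_getD, List.head?_drop]
      rw [hdd, hh, Bool.decide_and]
      cases pvBreakCond ((L.drop jl).headD "") <;> simp [Bool.and_assoc]

theorem findJob_eq (job_index : Int) : ∀ (lines : List String) (jc : Int) (i : Nat),
    pvFindJob job_index jc i lines =
      (pvJobLine? lines (job_index - jc - 1)).map
        (fun j => (i + j, (lines.drop j).headD "", lines.drop (j + 1))) := by
  intro lines
  induction lines with
  | nil => intro jc i; simp [pvFindJob, pvJobLine?]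
  | cons l rest ih =>
    intro jc i
    simp only [pvFindJob, pvJobLine?]
    by_cases hj : pvHasJob l = true
    · simp only [hj, if_true]
      by_cases he : jc + 1 = job_index
      · have h0 : job_index - jc - 1 = 0 := by omega
        simp [he, h0]
      · have h0 : ¬ (job_index - jc - 1 = 0) := by omega
        rw [if_neg he, if_neg h0, ih]
        have : job_index - (jc + 1) - 1 = job_index - jc - 1 - 1 := by ring
        rw [this]
        cases pvJobLine? rest (job_index - jc - 1 - 1) with
        | none => simp
        | some j => simp; omega
    · simp only [hj, if_false, Bool.false_eq_true]
      rw [ih]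
      have : job_index - jc - 1 = job_index - jc - 1 := rfl
      cases pvJobLine? rest (job_index - jc - 1) with
      | none => simp
      | some j => simp; omega
theorem findSteps_eq : ∀ (lines : List String) (i : Nat),
    pvFindSteps i lines =
      (List.findIdx? pvHasSteps lines).map (fun s => (i + s, lines.drop (s + 1))) := by
  intro lines
  induction lines with
  | nil => intro i; simp [pvFindSteps, List.findIdx?_nil]
  | cons l rest ih =>
    intro i
    simp only [pvFindSteps, List.findIdx?_cons]
    by_cases hs : pvHasSteps l = true
    · simp [hs]
    · rw [if_neg hs, if_neg hs, ih]
      cases List.findIdx? pvHasSteps rest with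
      | none => simp
      | some s => simp; omega

theorem alt_phase1 (ji si : Int) : ∀ (lines : List String) (i : Nat) (j s : Int),
    pvAltLoop ji si lines i 1 j s =
      match List.findIdx? pvHasSteps lines with
      | none => -1
      | some sl => pvAltLoop ji si (lines.drop (sl + 1)) (i + sl + 1) 2 j s := by
  intro lines
  induction lines with
  | nil => intro i j s; simp [pvAltLoop, List.findIdx?_nil]
  | cons l rest ih =>
    intro i j s
    simp only [pvAltLoop, List.findIdx?_cons]
    by_cases hs : pvHasSteps l = true
    · simp [hs]
    · rw [if_neg hs, if_neg hs]
      simp only [show (1 : Nat) ≠ 0 by decide, reduceIte]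
      rw [ih]
      cases List.findIdx? pvHasSteps rest with
      | none => simp
      | some sl =>
        simp only [Option.map_some]
        have h1 : i + 1 + sl + 1 = i + (sl + 1) + 1 := by omega
        have h2 : List.drop (sl + 1 + 1) (l :: rest) = List.drop (sl + 1) rest := by simp
        rw [h1, h2]
theorem alt_phase0 (ji si : Int) : ∀ (lines : List String) (i : Nat) (jobs s : Int),
    pvAltLoop ji si lines i 0 jobs s =
      match pvJobLine? lines (ji - jobs) with
      | none => -1
      | some jl =>
        if pvHasSteps ((lines.drop jl).headD "") then
          pvAltLoop ji si (lines.drop (jl + 1)) (i + jl + 1) 2 ji s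
        else pvAltLoop ji si (lines.drop (jl + 1)) (i + jl + 1) 1 ji s := by
  intro lines
  induction lines with
  | nil => intro i jobs s; simp [pvAltLoop, pvJobLine?]
  | cons l rest ih =>
    intro i jobs s
    simp only [pvAltLoop, pvJobLine?, reduceIte]
    by_cases hj : pvHasJob l = true
    · simp only [hj, Bool.not_true, Bool.false_eq_true, if_false]
      by_cases he : jobs = ji
      · have h0 : ji - jobs = 0 := by omega
        simp [he]
      · have h0 : ¬ (ji - jobs = 0) := by omega
        rw [if_pos he, ih, if_pos trivial, if_neg h0]
        have harg : ji - (jobs + 1) = ji - jobs - 1 := by ring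
        rw [harg]
        cases pvJobLine? rest (ji - jobs - 1) with
        | none => simp
        | some jl =>
          simp only [Option.map_some]
          have e1 : List.drop (jl + 1) (l :: rest) = List.drop jl rest := by simp
          have e2 : List.drop (jl + 1 + 1) (l :: rest) = List.drop (jl + 1) rest := by simp
          have e3 : i + 1 + jl + 1 = i + (jl + 1) + 1 := by omega
          rw [e1, e2, e3]
    · simp only [hj, Bool.not_false, if_pos, Bool.false_eq_true, if_false]
      rw [ih]
      cases pvJobLine? rest (ji - jobs) with
      | none => simp
      | some jl =>
        simp only [Option.map_some]
        have e1 : List.drop (jl + 1) (l :: rest) = List.drop jl rest := by simp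
        have e2 : List.drop (jl + 1 + 1) (l :: rest) = List.drop (jl + 1) rest := by simp
        have e3 : i + 1 + jl + 1 = i + (jl + 1) + 1 := by omega
        rw [e1, e2, e3]
theorem alt_phase2_miss (ji si : Int) : ∀ (lines : List String) (i : Nat) (j s : Int),
    (si < s ∨ s + (pvCountSteps lines : Int) ≤ si) →
    pvAltLoop ji si lines i 2 j s = -1 := by
  intro lines
  induction lines with
  | nil => intro i j s _; simp [pvAltLoop]
  | cons l rest ih =>
    intro i j s h
    simp only [pvAltLoop, show (2 : Nat) ≠ 0 by decide, show (2 : Nat) ≠ 1 by decide, reduceIte]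
    by_cases hst : pvIsStep l = true
    · have hc : pvCountSteps (l :: rest) = pvCountSteps rest + 1 := by
        simp [pvCountSteps, hst]
      rw [if_pos hst, if_neg (by omega : ¬ (s = si)), ih]
      omega
    · have hc : pvCountSteps (l :: rest) = pvCountSteps rest := by
        simp [pvCountSteps, hst]
      rw [if_neg hst, ih]
      omega

theorem alt_phase2_nonneg (ji si : Int) : ∀ (lines : List String) (i : Nat) (j s : Int),
    s ≤ si → si < s + (pvCountSteps lines : Int) →
    0 ≤ pvAltLoop ji si lines i 2 j s := by
  intro lines
  induction lines with
  | nil => intro i j s h1 h2; simp [pvCountSteps] at h2; omega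
  | cons l rest ih =>
    intro i j s h1 h2
    simp only [pvAltLoop, show (2 : Nat) ≠ 0 by decide, show (2 : Nat) ≠ 1 by decide, reduceIte]
    by_cases hst : pvIsStep l = true
    · have hc : pvCountSteps (l :: rest) = pvCountSteps rest + 1 := by
        simp [pvCountSteps, hst]
      rw [if_pos hst]
      by_cases he : s = si
      · rw [if_pos he]; positivity
      · rw [if_neg he]; exact ih _ _ _ (by omega) (by omega)
    · have hc : pvCountSteps (l :: rest) = pvCountSteps rest := by
        simp [pvCountSteps, hst]
      rw [if_neg hst]; exact ih _ _ _ h1 (by omega)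

theorem countLoop_eq (ji si : Int) (jline : String) (hb : pvBreakCond jline = false) :
    ∀ (lines : List String) (i : Nat) (j s : Int),
    pvCountLoop jline si (s - 1) i lines = pvAltLoop ji si lines i 2 j s := by
  intro lines
  induction lines with
  | nil => intro i j s; simp [pvCountLoop, pvAltLoop]
  | cons l rest ih =>
    intro i j s
    simp only [pvCountLoop, pvAltLoop, show (2 : Nat) ≠ 0 by decide, show (2 : Nat) ≠ 1 by decide,
      hb, Bool.false_eq_true, if_false]
    by_cases hst : pvIsStep l = true
    · rw [if_pos hst, if_pos hst]
      by_cases hs : s = si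
      · rw [if_pos (by omega : s - 1 + 1 = si), if_pos hs]
      · rw [if_neg (by omega : ¬ (s - 1 + 1 = si)), if_neg hs]
        have : s - 1 + 1 = (s + 1) - 1 := by ring
        rw [this, ih]
    · rw [if_neg hst, if_neg hst, ih]
theorem final_seg (ji si : Int) (jline : String) (after : List String) (i : Nat) (j : Int)
    (h : pvBreakCond jline = true → pvResid si after = false) :
    pvCountLoop jline si (-1) i after = pvAltLoop ji si after i 2 j 0 := by
  cases hb : pvBreakCond jline with
  | false =>
    have := countLoop_eq ji si jline hb after i j 0
    simpa using this
  | true =>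
    have hr := h hb
    cases after with
    | nil => simp [pvCountLoop, pvAltLoop]
    | cons l rest =>
      simp only [pvCountLoop, pvAltLoop, show (2 : Nat) ≠ 0 by decide,
        show (2 : Nat) ≠ 1 by decide, hb, reduceIte]
      by_cases hst : pvIsStep l = true
      · rw [if_pos hst, if_pos hst]
        by_cases hs : si = 0
        · rw [if_pos (by omega : (-1 : Int) + 1 = si), if_pos (by omega : (0 : Int) = si)]
        · rw [if_neg (by omega : ¬ ((-1 : Int) + 1 = si)), if_neg (by omega : ¬ ((0 : Int) = si))]
          simp only [pvResid, hs, decide_false, Bool.false_and, Bool.not_false, Bool.and_true,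
            Bool.and_eq_false_iff, decide_eq_false_iff_not] at hr
          rw [show (0 : Int) + 1 = 1 by ring, alt_phase2_miss ji si rest (i + 1) j 1]
          have hc : pvCountSteps (l :: rest) = pvCountSteps rest + 1 := by
            simp [pvCountSteps, hst]
          omega
      · rw [if_neg hst, if_neg hst]
        simp only [pvResid, List.headD_cons, hst, Bool.and_false, Bool.not_false, Bool.and_true,
          Bool.and_eq_false_iff, decide_eq_false_iff_not] at hr
        rw [alt_phase2_miss ji si rest (i + 1) j 0]
        have hc : pvCountSteps (l :: rest) = pvCountSteps rest := by
          simp [pvCountSteps, hst]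
        omega

theorem countLoop_break_neg (si : Int) (jline : String) (after : List String) (i : Nat)
    (hb : pvBreakCond jline = true) (hr : pvResid si after = true) :
    pvCountLoop jline si (-1) i after = -1 := by
  cases after with
  | nil => simp [pvCountLoop]
  | cons l rest =>
    simp only [pvResid, List.headD_cons, Bool.and_eq_true, Bool.not_eq_true',
      Bool.and_eq_false_iff, decide_eq_true_eq] at hr
    simp only [pvCountLoop, hb, reduceIte]
    by_cases hst : pvIsStep l = true
    · rw [if_pos hst]
      have hs : ¬ (si = 0) := by
        rcases hr with ⟨⟨_, _⟩, h3⟩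
        rcases h3 with h3 | h3
        · intro he; simp [he] at h3
        · simp [hst] at h3
      rw [if_neg (by omega : ¬ ((-1 : Int) + 1 = si))]
    · rw [if_neg hst]
theorem find_azure_task_line_py_spec' : ∀ (lines : List String) (ji si : Int),
    ¬ (pvDOld lines ji si = true) →
    find_azure_task_line_py lines ji si = find_azure_task_line_py_alt lines ji si := by
  intro lines ji si hnd
  rw [Bool.not_eq_true] at hnd
  unfold find_azure_task_line_py find_azure_task_line_py_alt
  rw [findJob_eq, alt_phase0]
  rw [show ji - (-1) - 1 = ji by ring, show ji - 0 = ji by ring]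
  cases hJ : pvJobLine? lines ji with
  | none => simp
  | some jl =>
    simp only [pvDOld, hJ] at hnd
    simp only [Option.map_some]
    have hdl1 : lines.drop (jl + 1) = (lines.drop jl).tail := by rw [List.tail_drop]
    cases hdl : lines.drop jl with
    | nil =>
      rw [hdl] at hdl1
      simp [hdl1, pvFindSteps, pvAltLoop, show pvHasSteps "" = false by decide]
    | cons hd tl =>
      rw [hdl] at hdl1 hnd
      simp only [hdl1, List.headD_cons, List.tail_cons]
      by_cases hs : pvHasSteps hd = true
      · simp only [List.findIdx?_cons, hs, if_pos, List.drop_succ_cons, List.drop_zero] at hnd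
        simp only [pvFindSteps, hs, reduceIte, Nat.zero_add]
        exact final_seg ji si hd tl (jl + 1) ji (by intro hbt; simp only [List.headD_cons, hbt, Bool.true_and] at hnd; exact hnd)
      · simp only [List.findIdx?_cons, hs, Bool.false_eq_true, reduceIte] at hnd
        simp only [pvFindSteps, hs, Bool.false_eq_true, reduceIte, Nat.zero_add]
        rw [findSteps_eq, alt_phase1]
        cases hS : List.findIdx? pvHasSteps tl with
        | none => simp
        | some sl =>
          rw [hS] at hnd
          simp only [Option.map_some, List.drop_succ_cons] at hnd ⊢
          exact final_seg ji si hd (tl.drop (sl + 1)) (jl + 1 + sl + 1) ji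
            (by intro hbt; simp only [List.headD_cons, hbt, Bool.true_and] at hnd; exact hnd)

theorem find_azure_task_line_py_tight' : ∀ (lines : List String) (ji si : Int),
    pvDOld lines ji si = true →
    find_azure_task_line_py lines ji si ≠ find_azure_task_line_py_alt lines ji si := by
  intro lines ji si hd
  unfold find_azure_task_line_py find_azure_task_line_py_alt
  rw [findJob_eq, alt_phase0]
  rw [show ji - (-1) - 1 = ji by ring, show ji - 0 = ji by ring]
  cases hJ : pvJobLine? lines ji with
  | none => simp [pvDOld, hJ] at hd
  | some jl =>
    simp only [pvDOld, hJ] at hd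
    simp only [Option.map_some]
    have hdl1 : lines.drop (jl + 1) = (lines.drop jl).tail := by rw [List.tail_drop]
    cases hdl : lines.drop jl with
    | nil => rw [hdl] at hd; simp [List.findIdx?_nil] at hd
    | cons h0 tl =>
      rw [hdl] at hdl1 hd
      simp only [List.headD_cons, Bool.and_eq_true] at hd
      obtain ⟨hb, hrest⟩ := hd
      simp only [hdl1, List.headD_cons, List.tail_cons]
      by_cases hs : pvHasSteps h0 = true
      · simp only [List.findIdx?_cons, hs, reduceIte, List.drop_succ_cons, List.drop_zero] at hrest
        simp only [pvFindSteps, hs, reduceIte, Nat.zero_add]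
        have hA := countLoop_break_neg si h0 tl (jl + 1) hb hrest
        have hB : 0 ≤ pvAltLoop ji si tl (jl + 1) 2 ji 0 := by
          apply alt_phase2_nonneg
          · simp only [pvResid, Bool.and_eq_true, decide_eq_true_eq] at hrest; omega
          · simp only [pvResid, Bool.and_eq_true, decide_eq_true_eq] at hrest; omega
        omega
      · simp only [List.findIdx?_cons, hs, Bool.false_eq_true, reduceIte] at hrest
        simp only [pvFindSteps, hs, Bool.false_eq_true, reduceIte, Nat.zero_add]
        rw [findSteps_eq, alt_phase1]
        cases hS : List.findIdx? pvHasSteps tl with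
        | none => rw [hS] at hrest; simp at hrest
        | some sl =>
          rw [hS] at hrest
          simp only [Option.map_some, List.drop_succ_cons] at hrest ⊢
          have hA := countLoop_break_neg si h0 (tl.drop (sl + 1)) (jl + 1 + sl + 1) hb hrest
          have hB : 0 ≤ pvAltLoop ji si (tl.drop (sl + 1)) (jl + 1 + sl + 1) 2 ji 0 := by
            apply alt_phase2_nonneg
            · simp only [pvResid, Bool.and_eq_true, decide_eq_true_eq] at hrest; omega
            · simp only [pvResid, Bool.and_eq_true, decide_eq_true_eq] at hrest; omega
          omega

-- ===== VERDICT (by name: the statement is the Claim_ definition above) =====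
theorem find_azure_task_line_py_spec : Claim_unchanged_find_azure_task_line_py := by
  intro file_lines job_index step_index _dom
  unfold Spec_find_azure_task_line_py D_find_azure_task_line_py
  rw [dflag_eq]
  exact find_azure_task_line_py_spec' file_lines job_index step_index

theorem find_azure_task_line_py_changed : Claim_changed_find_azure_task_line_py := by
  unfold Claim_changed_find_azure_task_line_py; decide

theorem find_azure_task_line_py_tight : Claim_exact_find_azure_task_line_py := by
  intro file_lines job_index step_index _dom hd
  unfold D_find_azure_task_line_py at hd
  rw [dflag_eq] at hd
  exact find_azure_task_line_py_tight' file_lines job_index step_index hd
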